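-- pv_equiv track=rewrite | github.com/Sunwoo0110/Algorithm | 프로그래머스/2/148653. 마법의 엘리베이터/마법의 엘리베이터.py | solution
-- ===== SOURCE A (Python) =====
-- def solution(storey):
--     answer = 0
--
--     while storey > 0:
--         curr = storey%10 ## 1의 자리
--         next = (storey//10)%10 ## 10의 자리
--
--         if curr < 5:
--             answer += curr
--             storey //= 10
--         elif curr > 5:
--             answer += (10-curr)
--             storey = (storey//10)+1
--         else:
--             if next < 5:
--                 answer += curr
--                 storey //= 10
--             else:
--                 answer += (10-curr)
--                 storey = (storey//10)+1
--     return answer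
-- ===== SOURCE B (Python) =====
-- def solution(storey):
--     if storey <= 0:
--         return 0
--     if storey < 10:
--         return min(storey, 11 - storey)
--     curr = storey % 10
--     rest = storey // 10
--     return min(curr + solution(rest), (10 - curr) + solution(rest + 1))
-- ===== Notes on version B (the rewrite author's own statement) =====
-- stated objective: alternative
-- what changed: A's greedy digit loop with an accumulator and a peek at the next digit to break the middle-digit tie is replaced by a branching recursion that returns the minimum over the round-down and carry-up choices at each digit.
import Mathlib
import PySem

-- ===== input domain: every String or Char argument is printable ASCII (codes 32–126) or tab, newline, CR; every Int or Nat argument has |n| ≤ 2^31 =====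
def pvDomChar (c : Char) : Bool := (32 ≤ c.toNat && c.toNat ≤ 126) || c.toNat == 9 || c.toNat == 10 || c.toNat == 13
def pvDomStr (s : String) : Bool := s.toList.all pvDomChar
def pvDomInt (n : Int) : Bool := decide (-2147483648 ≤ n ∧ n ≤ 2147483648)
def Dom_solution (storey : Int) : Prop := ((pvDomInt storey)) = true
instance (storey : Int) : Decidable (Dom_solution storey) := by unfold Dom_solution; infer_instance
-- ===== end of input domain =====

-- B replaces A's greedy per-digit loop (which peeks at the next digit to break the 5-tie)
-- by a branching recursion taking the minimum over the round-down and carry-up choices.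

-- ===== PORT A =====
-- A's while loop, transliterated as a tail recursion over (storey, answer).
def solutionLoop (storey answer : Int) : Int :=
  if storey > 0 then
    -- curr = storey % 10, next = (storey // 10) % 10, written inline
    if PySem.Int.mod storey 10 < 5 then
      solutionLoop (PySem.Int.floordiv storey 10) (answer + PySem.Int.mod storey 10)
    else if PySem.Int.mod storey 10 > 5 then
      solutionLoop (PySem.Int.floordiv storey 10 + 1) (answer + (10 - PySem.Int.mod storey 10))
    else if PySem.Int.mod (PySem.Int.floordiv storey 10) 10 < 5 then
      solutionLoop (PySem.Int.floordiv storey 10) (answer + PySem.Int.mod storey 10)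
    else
      solutionLoop (PySem.Int.floordiv storey 10 + 1) (answer + (10 - PySem.Int.mod storey 10))
  else answer
termination_by storey.toNat
decreasing_by
  all_goals
    simp only [PySem.Int.floordiv_eq_ediv_of_pos (show (0:Int) < 10 by norm_num),
      PySem.Int.mod_eq_emod_of_pos (show (0:Int) < 10 by norm_num)] at *
  all_goals omega

def solution (storey : Int) : Int := solutionLoop storey 0

-- ===== PORT B =====
def solution_alt (storey : Int) : Int :=
  if storey ≤ 0 then 0
  else if storey < 10 then min storey (11 - storey)
  else
    -- curr = storey % 10, rest = storey // 10, written inline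
    min (PySem.Int.mod storey 10 + solution_alt (PySem.Int.floordiv storey 10))
      ((10 - PySem.Int.mod storey 10) + solution_alt (PySem.Int.floordiv storey 10 + 1))
termination_by storey.toNat
decreasing_by
  all_goals
    simp only [PySem.Int.floordiv_eq_ediv_of_pos (show (0:Int) < 10 by norm_num)] at *
  all_goals omega

-- ===== PRECONDITION & SPEC =====
def Spec_solution (storey : Int) (out : Int) : Prop := out = solution_alt storey
instance (storey : Int) (out : Int) : Decidable (Spec_solution storey out) := by unfold Spec_solution; infer_instance

-- ===== CLAIM (what is proved, stated in full; the proofs are below) =====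
def Claim_equal_solution : Prop := ∀ (storey : Int), Dom_solution storey → Spec_solution storey (solution storey)

-- ===== LEMMAS AND PROOFS =====

theorem alt_eq (s : Int) : solution_alt s =
    if s ≤ 0 then 0
    else if s < 10 then min s (11 - s)
    else min (s % 10 + solution_alt (s / 10)) (10 - s % 10 + solution_alt (s / 10 + 1)) := by
  rw [solution_alt]
  simp only [PySem.Int.floordiv_eq_ediv_of_pos (show (0:Int) < 10 by norm_num),
    PySem.Int.mod_eq_emod_of_pos (show (0:Int) < 10 by norm_num)]

theorem loop_eq (s a : Int) : solutionLoop s a =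
    (if s > 0 then
      if s % 10 < 5 then solutionLoop (s / 10) (a + s % 10)
      else if s % 10 > 5 then solutionLoop (s / 10 + 1) (a + (10 - s % 10))
      else if (s / 10) % 10 < 5 then solutionLoop (s / 10) (a + s % 10)
      else solutionLoop (s / 10 + 1) (a + (10 - s % 10))
    else a) := by
  rw [solutionLoop]
  simp only [PySem.Int.floordiv_eq_ediv_of_pos (show (0:Int) < 10 by norm_num),
    PySem.Int.mod_eq_emod_of_pos (show (0:Int) < 10 by norm_num)]

-- The structural facts about B that make A's greedy choices optimal:
-- nonnegativity, |B(s+1) - B(s)| ≤ 1, and monotone step direction decided by the last digit.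
def AltFacts (s : Int) : Prop :=
  0 ≤ solution_alt s ∧
  solution_alt s ≤ solution_alt (s + 1) + 1 ∧
  solution_alt (s + 1) ≤ solution_alt s + 1 ∧
  (s % 10 < 5 → solution_alt s ≤ solution_alt (s + 1)) ∧
  (5 ≤ s % 10 → solution_alt (s + 1) ≤ solution_alt s)

theorem altFacts : ∀ n : Nat, ∀ s : Int, 0 ≤ s → s.toNat = n → AltFacts s := by
  intro n
  induction n using Nat.strong_induction_on with
  | _ n ih =>
    intro s hs hn
    by_cases hbig : 10 ≤ s
    · obtain ⟨hq0, hqL1, hqL2, -, -⟩ :=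
        ih (s / 10).toNat (by omega) (s / 10) (by omega) rfl
      obtain ⟨hq10, hq1L1, hq1L2, -, -⟩ :=
        ih (s / 10 + 1).toNat (by omega) (s / 10 + 1) (by omega) rfl
      by_cases hd9 : s % 10 = 9
      · have h1 : (s + 1) % 10 = 0 := by omega
        have h2 : (s + 1) / 10 = s / 10 + 1 := by omega
        unfold AltFacts
        rw [alt_eq s, alt_eq (s + 1), if_neg (by omega), if_neg (by omega),
          if_neg (by omega), if_neg (by omega), h1, h2]
        refine ⟨by omega, by omega, by omega, by omega, by omega⟩
      · have h1 : (s + 1) % 10 = s % 10 + 1 := by omega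
        have h2 : (s + 1) / 10 = s / 10 := by omega
        unfold AltFacts
        rw [alt_eq s, alt_eq (s + 1), if_neg (by omega), if_neg (by omega),
          if_neg (by omega), if_neg (by omega), h1, h2]
        refine ⟨by omega, by omega, by omega, by omega, by omega⟩
    · have h0 : solution_alt 0 = 0 := by rw [alt_eq]; norm_num
      have h1 : solution_alt 1 = 1 := by rw [alt_eq]; norm_num [min_def]
      have h2 : solution_alt 2 = 2 := by rw [alt_eq]; norm_num [min_def]
      have h3 : solution_alt 3 = 3 := by rw [alt_eq]; norm_num [min_def]
      have h4 : solution_alt 4 = 4 := by rw [alt_eq]; norm_num [min_def]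
      have h5 : solution_alt 5 = 5 := by rw [alt_eq]; norm_num [min_def]
      have h6 : solution_alt 6 = 5 := by rw [alt_eq]; norm_num [min_def]
      have h7 : solution_alt 7 = 4 := by rw [alt_eq]; norm_num [min_def]
      have h8 : solution_alt 8 = 3 := by rw [alt_eq]; norm_num [min_def]
      have h9 : solution_alt 9 = 2 := by rw [alt_eq]; norm_num [min_def]
      have h10 : solution_alt 10 = 1 := by
        rw [alt_eq]; norm_num [min_def, h1, h2]
      unfold AltFacts
      interval_cases s <;>
        norm_num [h0, h1, h2, h3, h4, h5, h6, h7, h8, h9, h10]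

theorem loopEq : ∀ n : Nat, ∀ s : Int, s.toNat = n → ∀ a : Int,
    solutionLoop s a = a + solution_alt s := by
  intro n
  induction n using Nat.strong_induction_on with
  | _ n ih =>
    intro s hn a
    by_cases hpos : 0 < s
    · rw [loop_eq]
      have ihq := ih (s / 10).toNat (by omega) (s / 10) rfl
      have ihq1 : 5 ≤ s % 10 → ∀ a : Int,
          solutionLoop (s / 10 + 1) a = a + solution_alt (s / 10 + 1) := fun h5 =>
        ih (s / 10 + 1).toNat (by omega) (s / 10 + 1) rfl
      by_cases hbig : 10 ≤ s
      · obtain ⟨hq0, hqL1, hqL2, hqL3, hqL4⟩ :=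
          altFacts (s / 10).toNat (s / 10) (by omega) rfl
        by_cases h5 : s % 10 < 5
        · rw [if_pos hpos, if_pos h5, ihq, alt_eq s, if_neg (by omega), if_neg (by omega)]
          omega
        · by_cases h6 : s % 10 > 5
          · rw [if_pos hpos, if_neg h5, if_pos h6, ihq1 (by omega), alt_eq s,
              if_neg (by omega), if_neg (by omega)]
            omega
          · by_cases hnext : (s / 10) % 10 < 5
            · rw [if_pos hpos, if_neg h5, if_neg h6, if_pos hnext, ihq, alt_eq s,
                if_neg (by omega), if_neg (by omega)]
              have := hqL3 hnext; omega
            · rw [if_pos hpos, if_neg h5, if_neg h6, if_neg hnext, ihq1 (by omega), alt_eq s,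
                if_neg (by omega), if_neg (by omega)]
              have := hqL4 (by omega); omega
      · -- single digit: 1 ≤ s ≤ 9, so s / 10 = 0 and s % 10 = s
        have hq : s / 10 = 0 := by omega
        have h0 : solution_alt (s / 10) = 0 := by rw [hq, alt_eq]; norm_num
        have h1 : solution_alt (s / 10 + 1) = 1 := by rw [hq, alt_eq]; norm_num [min_def]
        rw [h0] at ihq
        rw [h1] at ihq1
        by_cases h5 : s % 10 < 5
        · rw [if_pos hpos, if_pos h5, ihq, alt_eq s, if_neg (by omega), if_pos (by omega)]
          rw [min_def]; split_ifs <;> omega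
        · by_cases h6 : s % 10 > 5
          · rw [if_pos hpos, if_neg h5, if_pos h6, ihq1 (by omega), alt_eq s,
              if_neg (by omega), if_pos (by omega)]
            rw [min_def]; split_ifs <;> omega
          · have hnext : (s / 10) % 10 < 5 := by omega
            rw [if_pos hpos, if_neg h5, if_neg h6, if_pos hnext, ihq, alt_eq s,
              if_neg (by omega), if_pos (by omega)]
            rw [min_def]; split_ifs <;> omega
    · rw [loop_eq, if_neg (by omega), alt_eq, if_pos (by omega)]; omega

-- ===== VERDICT (by name: the statement is the Claim_ definition above) =====
theorem solution_spec : Claim_equal_solution := by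
  intro storey _
  unfold Spec_solution solution
  rw [loopEq storey.toNat storey rfl 0]
  omega
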